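-- pv_equiv track=rewrite | github.com/alledy/algorithm-practice | inflearn/그리디/역수열.py | yuk_su
-- ===== SOURCE A (Python) =====
-- def yuk_su(arr):
--     ans = [0] * len(arr)
--
--     for cur_n in range(1, len(arr)+1):
--         target = arr[cur_n-1]
--         cnt = 0
--         for p, x in enumerate(ans):
--             if target == cnt:
--                 if x == 0:
--                     ans[p] = cur_n
--                     break
--                 else:
--                     continue
--             if x == 0:
--                 cnt += 1
--
--     return ans
-- ===== SOURCE B (Python) =====
-- def yuk_su(arr):
--     n = len(arr)
--     ans = [0] * n
--     empty = list(range(n))  # positions still holding 0, in increasing order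
--     for i, t in enumerate(arr, 1):
--         if 0 <= t < len(empty):
--             ans[empty.pop(t)] = i
--     return ans
-- ===== Notes on version B (the rewrite author's own statement) =====
-- stated objective: faster
-- what changed: A rescans the whole answer array for every element, counting empty slots until it reaches the target; B instead maintains the list of still-empty positions and pops the target-th one directly, so the per-element counting scan disappears.
import Mathlib
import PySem

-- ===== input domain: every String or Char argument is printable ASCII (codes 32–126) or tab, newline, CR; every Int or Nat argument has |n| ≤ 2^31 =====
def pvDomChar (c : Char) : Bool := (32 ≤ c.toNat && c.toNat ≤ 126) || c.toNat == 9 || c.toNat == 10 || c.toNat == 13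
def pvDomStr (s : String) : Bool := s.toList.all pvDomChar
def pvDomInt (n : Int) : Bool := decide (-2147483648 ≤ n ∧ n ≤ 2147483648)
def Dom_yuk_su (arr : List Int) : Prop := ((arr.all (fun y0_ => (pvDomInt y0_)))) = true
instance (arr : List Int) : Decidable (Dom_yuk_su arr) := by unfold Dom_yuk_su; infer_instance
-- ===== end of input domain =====

-- B replaces A's quadratic rescan (counting zero slots from scratch for every element)
-- by a maintained list of still-empty positions from which the target-th one is popped (measurably faster: the interpreted per-element scan becomes one list.pop).

-- ===== PORT A =====
-- inner loop of A: scan `ans`, counting empty (0) slots in `cnt`; when `cnt`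
-- reaches `target` at an empty slot, write `curN` there and stop.
def yukInnerA (target curN : Int) : Int → List Int → List Int
  | _, [] => []
  | cnt, x :: rest =>
    if target = cnt then
      if x = 0 then curN :: rest
      else x :: yukInnerA target curN cnt rest
    else if x = 0 then x :: yukInnerA target curN (cnt + 1) rest
    else x :: yukInnerA target curN cnt rest

-- outer loop of A: cur_n = 1 .. len(arr), target = arr[cur_n-1]
def yukOuterA : List Int → Int → List Int → List Int
  | [], _, ans => ans
  | t :: rest, curN, ans => yukOuterA rest (curN + 1) (yukInnerA t curN 0 ans)

def yuk_su (arr : List Int) : List Int :=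
  yukOuterA arr 1 (List.replicate arr.length 0)

-- ===== PORT B =====
-- B: keep the list of still-empty positions; pop the t-th of them (Python's empty.pop(t)).
def yukGoB : List Int → Int → List Int → List Nat → List Int
  | [], _, ans, _ => ans
  | t :: rest, i, ans, empty =>
    if 0 ≤ t ∧ t < (empty.length : Int) then
      yukGoB rest (i + 1) (ans.set (empty.getD t.toNat 0) i) (empty.eraseIdx t.toNat)
    else
      yukGoB rest (i + 1) ans empty

def yuk_su_alt (arr : List Int) : List Int :=
  yukGoB arr 1 (List.replicate arr.length 0) (List.range arr.length)

-- ===== PRECONDITION & SPEC =====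
def Spec_yuk_su (arr : List Int) (out : List Int) : Prop := out = yuk_su_alt arr
instance (arr : List Int) (out : List Int) : Decidable (Spec_yuk_su arr out) := by unfold Spec_yuk_su; infer_instance

-- ===== CLAIM (what is proved, stated in full; the proofs are below) =====
def Claim_equal_yuk_su : Prop := ∀ (arr : List Int), Dom_yuk_su arr → Spec_yuk_su arr (yuk_su arr)

-- ===== LEMMAS AND PROOFS =====

-- positions of the zero entries of a list, in increasing order
def zi : List Int → List Nat
  | [] => []
  | x :: rest => if x = 0 then 0 :: (zi rest).map (· + 1) else (zi rest).map (· + 1)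

theorem zi_cons_zero (rest : List Int) : zi (0 :: rest) = 0 :: (zi rest).map (· + 1) := by
  simp [zi]

theorem zi_cons_ne (x : Int) (rest : List Int) (hx : x ≠ 0) :
    zi (x :: rest) = (zi rest).map (· + 1) := by
  simp [zi, hx]

theorem getD_map_succ (l : List Nat) (j : Nat) (h : j < l.length) :
    (l.map (· + 1)).getD j 0 = l.getD j 0 + 1 := by
  rw [List.getD_eq_getElem?_getD, List.getD_eq_getElem?_getD, List.getElem?_map,
    List.getElem?_eq_getElem h]
  simp

theorem eraseIdx_map_succ (l : List Nat) (j : Nat) :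
    (l.map (· + 1)).eraseIdx j = (l.eraseIdx j).map (· + 1) := by
  induction l generalizing j with
  | nil => simp
  | cons a l ih =>
    cases j with
    | zero => simp
    | succ j => simp [List.eraseIdx, ih]

-- A's inner scan places curN at the (t - cnt)-th empty slot (if one exists).
theorem innerA_eq (ans : List Int) (t n : Int) : ∀ cnt : Int,
    yukInnerA t n cnt ans =
      if cnt ≤ t ∧ (t - cnt).toNat < (zi ans).length then
        ans.set ((zi ans).getD (t - cnt).toNat 0) n
      else ans := by
  induction ans with
  | nil => intro cnt; simp [yukInnerA, zi]
  | cons x rest ih =>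
    intro cnt
    by_cases hx : x = 0
    · subst hx
      by_cases ht : t = cnt
      · subst ht
        rw [zi_cons_zero]
        have h1 : yukInnerA t n t (0 :: rest) = n :: rest := by
          simp [yukInnerA]
        rw [h1, if_pos ⟨le_refl t, by simp⟩]
        have h2 : (t - t).toNat = 0 := by omega
        rw [h2, List.getD_cons_zero]
        rfl
      · have h1 : yukInnerA t n cnt (0 :: rest)
            = 0 :: yukInnerA t n (cnt + 1) rest := by
          simp [yukInnerA, ht]
        rw [h1, ih (cnt + 1), zi_cons_zero]
        by_cases hc : cnt + 1 ≤ t ∧ (t - (cnt + 1)).toNat < (zi rest).length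
        · have hcc : cnt ≤ t ∧ (t - cnt).toNat
              < (0 :: (zi rest).map (· + 1)).length := by
            simp; omega
          rw [if_pos hc, if_pos hcc]
          have htn : (t - cnt).toNat = (t - (cnt + 1)).toNat + 1 := by omega
          rw [htn, List.getD_cons_succ, getD_map_succ _ _ hc.2]
          rfl
        · rw [if_neg hc, if_neg ?_]
          intro hcc
          apply hc
          refine ⟨by omega, ?_⟩
          have : (t - cnt).toNat < (zi rest).length + 1 := by
            simpa using hcc.2
          omega
    · have h1 : yukInnerA t n cnt (x :: rest)
          = x :: yukInnerA t n cnt rest := by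
        by_cases ht : t = cnt <;> simp [yukInnerA, ht, hx]
      rw [h1, ih cnt, zi_cons_ne x rest hx]
      by_cases hc : cnt ≤ t ∧ (t - cnt).toNat < (zi rest).length
      · rw [if_pos hc, if_pos (by simpa using hc)]
        rw [getD_map_succ _ _ hc.2]
        rfl
      · rw [if_neg hc, if_neg (by simpa using hc)]

-- writing a nonzero value at the j-th zero position removes exactly that position
theorem zi_set (ans : List Int) : ∀ (j : Nat) (n : Int), j < (zi ans).length → n ≠ 0 →
    zi (ans.set ((zi ans).getD j 0) n) = (zi ans).eraseIdx j := by
  induction ans with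
  | nil => intro j n h _; simp [zi] at h
  | cons x rest ih =>
    intro j n h hn
    by_cases hx : x = 0
    · subst hx
      rw [zi_cons_zero] at h ⊢
      cases j with
      | zero =>
        rw [List.getD_cons_zero]
        show zi (n :: rest) = _
        rw [zi_cons_ne n rest hn]
        rfl
      | succ j =>
        have hj : j < (zi rest).length := by simpa using h
        rw [List.getD_cons_succ, getD_map_succ _ _ hj]
        show zi (0 :: rest.set ((zi rest).getD j 0) n) = _
        rw [zi_cons_zero, ih j n hj hn, List.eraseIdx_cons_succ, eraseIdx_map_succ]
    · rw [zi_cons_ne x rest hx] at h ⊢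
      have hj : j < (zi rest).length := by simpa using h
      rw [getD_map_succ _ _ hj]
      show zi (x :: rest.set ((zi rest).getD j 0) n) = _
      rw [zi_cons_ne _ _ hx, ih j n hj hn, eraseIdx_map_succ]

theorem outer_eq_go (arr : List Int) : ∀ (i : Int) (ans : List Int), 1 ≤ i →
    yukOuterA arr i ans = yukGoB arr i ans (zi ans) := by
  induction arr with
  | nil => intro i ans _; simp [yukOuterA, yukGoB]
  | cons t rest ih =>
    intro i ans hi
    rw [yukOuterA, yukGoB, innerA_eq ans t i 0]
    by_cases hc : 0 ≤ t ∧ t < ((zi ans).length : Int)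
    · have h2 : (t - 0).toNat < (zi ans).length := by omega
      rw [if_pos ⟨hc.1, h2⟩, if_pos hc]
      have htn : (t - 0).toNat = t.toNat := by omega
      rw [htn] at h2 ⊢
      rw [ih (i + 1) _ (by omega)]
      rw [zi_set ans t.toNat i h2 (by omega)]
    · rw [if_neg (fun h => hc ⟨h.1, by omega⟩), if_neg hc]
      exact ih (i + 1) ans (by omega)

theorem zi_replicate (n : Nat) : zi (List.replicate n 0) = List.range n := by
  induction n with
  | zero => simp [zi]
  | succ n ih =>
    rw [List.replicate_succ, List.range_succ_eq_map, zi_cons_zero, ih]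

-- ===== VERDICT (by name: the statement is the Claim_ definition above) =====
theorem yuk_su_spec : Claim_equal_yuk_su := by
  intro arr _
  unfold Spec_yuk_su yuk_su yuk_su_alt
  rw [outer_eq_go arr 1 _ (by omega), zi_replicate]
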